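-- pv_equiv track=rewrite | github.com/jichunxie/xGATE | utilities/pathway_analysis.py | gather_pathways_between
-- ===== SOURCE A (Python) =====
-- def gather_pathways_between(start_pathway, end_pathway, categorized_pathways):
--     start_found = False
--     selected_pathways = []
--
--     for category in categorized_pathways:
--         if category == start_pathway:
--             start_found = True
--         if start_found:
--             selected_pathways.extend(categorized_pathways[category])
--         if category == end_pathway:
--             break
--
--     return selected_pathways
-- ===== SOURCE B (Python) =====
-- def gather_pathways_between(start_pathway, end_pathway, categorized_pathways):
--     keys = list(categorized_pathways)
--     if end_pathway in keys:
--         keys = keys[:keys.index(end_pathway) + 1]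
--     if start_pathway not in keys:
--         return []
--     start_idx = keys.index(start_pathway)
--     return [p for cat in keys[start_idx:] for p in categorized_pathways[cat]]
-- ===== Notes on version B (the rewrite author's own statement) =====
-- stated objective: alternative
-- what changed: B replaces A's streaming found-flag/break loop with boundary computation: it truncates the key list at the end key (inclusive), locates the start key's index in that slice (returning [] if absent), and flattens the values of the remaining slice in one comprehension.
import Mathlib
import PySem

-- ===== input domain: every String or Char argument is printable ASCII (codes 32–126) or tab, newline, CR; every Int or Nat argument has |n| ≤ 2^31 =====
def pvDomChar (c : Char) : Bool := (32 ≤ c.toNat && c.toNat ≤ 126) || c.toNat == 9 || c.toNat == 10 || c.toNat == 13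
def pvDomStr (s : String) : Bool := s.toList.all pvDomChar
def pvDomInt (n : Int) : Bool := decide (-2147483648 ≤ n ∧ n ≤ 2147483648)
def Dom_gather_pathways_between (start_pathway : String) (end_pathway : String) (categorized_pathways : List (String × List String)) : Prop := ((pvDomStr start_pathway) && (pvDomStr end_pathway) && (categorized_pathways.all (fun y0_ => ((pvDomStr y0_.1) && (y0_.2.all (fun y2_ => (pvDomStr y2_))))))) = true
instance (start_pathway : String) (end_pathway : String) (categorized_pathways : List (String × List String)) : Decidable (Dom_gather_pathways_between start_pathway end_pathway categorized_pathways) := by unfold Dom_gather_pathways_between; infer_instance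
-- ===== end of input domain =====

-- B computes the slice boundaries first (truncate at end key, then index of start key) instead of
-- A's streaming found-flag/break loop; objective: alternative decomposition of the same cost.

-- ===== PORT A =====
-- A's for-loop over the dict's keys with the start_found flag and the break at end_pathway.
def pvLoopA (s e : String) (f : String → List String) : List String → Bool → List String → List String
  | [], _, acc => acc
  | k :: ks, found, acc =>
    let fd := if k == s then true else found
    let acc' := if fd then acc ++ f k else acc
    if k == e then acc' else pvLoopA s e f ks fd acc'

def gather_pathways_between (start_pathway : String) (end_pathway : String) (categorized_pathways : List (String × List String)) : List String :=
  let d := PySem.Dict.ofList categorized_pathways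
  pvLoopA start_pathway end_pathway (fun k => d.getD k []) d.keys false []

-- ===== PORT B =====
def gather_pathways_between_alt (start_pathway : String) (end_pathway : String) (categorized_pathways : List (String × List String)) : List String :=
  let d := PySem.Dict.ofList categorized_pathways
  let keys0 := d.keys
  let keys := if keys0.contains end_pathway then keys0.take (keys0.idxOf end_pathway + 1) else keys0
  if keys.contains start_pathway then
    (keys.drop (keys.idxOf start_pathway)).flatMap (fun k => d.getD k [])
  else []

-- ===== PRECONDITION & SPEC =====
def Spec_gather_pathways_between (start_pathway : String) (end_pathway : String) (categorized_pathways : List (String × List String)) (out : List String) : Prop := out = gather_pathways_between_alt start_pathway end_pathway categorized_pathways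
instance (start_pathway : String) (end_pathway : String) (categorized_pathways : List (String × List String)) (out : List String) : Decidable (Spec_gather_pathways_between start_pathway end_pathway categorized_pathways out) := by unfold Spec_gather_pathways_between; infer_instance

-- ===== CLAIM (what is proved, stated in full; the proofs are below) =====
def Claim_equal_gather_pathways_between : Prop := ∀ (start_pathway : String) (end_pathway : String) (categorized_pathways : List (String × List String)), Dom_gather_pathways_between start_pathway end_pathway categorized_pathways → Spec_gather_pathways_between start_pathway end_pathway categorized_pathways (gather_pathways_between start_pathway end_pathway categorized_pathways)

-- ===== LEMMAS AND PROOFS =====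

-- the truncated key list B works with: up to and including the first end key, or all keys
def pvTrunc (e : String) (ks : List String) : List String :=
  if ks.contains e then ks.take (ks.idxOf e + 1) else ks

theorem pvTrunc_cons (e k : String) (ks : List String) :
    pvTrunc e (k :: ks) = if k = e then [k] else k :: pvTrunc e ks := by
  by_cases hk : k = e
  · simp [pvTrunc, hk]
  · simp only [pvTrunc, List.contains_cons]
    by_cases he : e ∈ ks
    · simp [he, List.take_succ_cons, hk]
    · simp [he, Ne.symm hk, hk]

theorem pvLoopA_true (s e : String) (f : String → List String) (ks acc : List String) :
    pvLoopA s e f ks true acc = acc ++ (pvTrunc e ks).flatMap f := by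
  induction ks generalizing acc with
  | nil => simp [pvLoopA, pvTrunc]
  | cons k ks ih =>
    rw [pvTrunc_cons]
    by_cases hk : k = e
    · simp [pvLoopA, hk]
    · simp [pvLoopA, hk, ih]

theorem pvLoopA_false (s e : String) (f : String → List String) (ks acc : List String) :
    pvLoopA s e f ks false acc =
      if s ∈ pvTrunc e ks then
        acc ++ ((pvTrunc e ks).drop ((pvTrunc e ks).idxOf s)).flatMap f
      else acc := by
  induction ks generalizing acc with
  | nil => simp [pvLoopA, pvTrunc]
  | cons k ks ih =>
    rw [pvTrunc_cons]
    by_cases hs : k = s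
    · subst hs
      by_cases hk : k = e
      · simp [pvLoopA, hk]
      · simp [pvLoopA, hk, pvLoopA_true]
    · by_cases hk : k = e
      · subst hk
        simp [pvLoopA, hs, Ne.symm hs]
      · have hne : (k == s) = false := by simp [hs]
        have hke : (k == e) = false := by simp [hk]
        simp only [pvLoopA, hne, hke, Bool.false_eq_true, if_false]
        rw [ih]
        by_cases hmem : s ∈ pvTrunc e ks
        · simp [hmem, hk, List.idxOf_cons, hne, List.drop_succ_cons]
        · simp [hmem, hk, Ne.symm hs]

-- ===== VERDICT (by name: the statement is the Claim_ definition above) =====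
theorem gather_pathways_between_spec : Claim_equal_gather_pathways_between := by
  intro s e cps _
  unfold Spec_gather_pathways_between gather_pathways_between gather_pathways_between_alt
  rw [pvLoopA_false]
  simp [pvTrunc]
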